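-- pv_equiv track=rewrite | github.com/bing-he/trader-helper-bing | ParkAndLoanScrapers/PNLScraper.py | _tce_map_rate_cols
-- ===== SOURCE A (Python) =====
-- def _tce_map_rate_cols(header_row):
--     idx = {"beg":0,"end":3,"rate":8}
--     lower = [str(c).strip().lower() if c is not None else "" for c in header_row]
--     for ci, txt in enumerate(lower):
--         if any(k in txt for k in ["disc beg date","begin date","start date","beg date"]): idx["beg"]=ci
--         if any(k in txt for k in ["disc end date","end date"]): idx["end"]=ci
--         if any(k in txt for k in ["rate chgd","rate charged","daily rate"]) or txt=="rate": idx["rate"]=ci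
--     return idx
-- ===== SOURCE B (Python) =====
-- def _tce_map_rate_cols(header_row):
--     lower = ["" if c is None else str(c).strip().lower() for c in header_row]
--
--     def last_index(pred, default):
--         hits = [ci for ci, txt in enumerate(lower) if pred(txt)]
--         return hits[-1] if hits else default
--
--     beg = last_index(lambda t: any(k in t for k in ("disc beg date", "begin date", "start date", "beg date")), 0)
--     end = last_index(lambda t: any(k in t for k in ("disc end date", "end date")), 3)
--     rate = last_index(lambda t: any(k in t for k in ("rate chgd", "rate charged", "daily rate")) or t == "rate", 8)
--     return {"beg": beg, "end": end, "rate": rate}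
-- ===== Notes on version B (the rewrite author's own statement) =====
-- stated objective: simpler
-- what changed: Replaces the single interleaved loop mutating a dict with three independent last-match scans (one per key, each a filtered index list whose last element is taken, with the key's default when empty), assembling the dict once at the end.
import Mathlib
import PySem

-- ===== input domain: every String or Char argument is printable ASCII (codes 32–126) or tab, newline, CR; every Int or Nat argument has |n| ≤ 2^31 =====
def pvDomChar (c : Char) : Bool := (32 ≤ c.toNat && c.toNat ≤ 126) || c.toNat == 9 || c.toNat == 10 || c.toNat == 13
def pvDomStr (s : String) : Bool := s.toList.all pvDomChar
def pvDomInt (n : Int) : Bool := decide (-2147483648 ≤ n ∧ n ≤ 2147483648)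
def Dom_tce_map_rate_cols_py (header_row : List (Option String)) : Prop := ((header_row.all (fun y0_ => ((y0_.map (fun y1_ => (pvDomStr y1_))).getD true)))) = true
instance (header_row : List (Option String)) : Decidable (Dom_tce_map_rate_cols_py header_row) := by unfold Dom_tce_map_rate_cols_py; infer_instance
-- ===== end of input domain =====

-- B replaces A's single interleaved dict-mutating loop by three independent last-match
-- scans (one per key, dict assembled once at the end); same cost, plainer structure.

-- ===== PORT A =====
-- the three `if any(k in txt …)` tests of A's loop body
def tceA_pBeg (t : String) : Bool :=
  ["disc beg date", "begin date", "start date", "beg date"].any (fun k => PySem.Str.isIn k t)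
def tceA_pEnd (t : String) : Bool :=
  ["disc end date", "end date"].any (fun k => PySem.Str.isIn k t)
def tceA_pRate (t : String) : Bool :=
  (["rate chgd", "rate charged", "daily rate"].any (fun k => PySem.Str.isIn k t)) || t == "rate"

def tce_map_rate_cols_py (header_row : List (Option String)) : List (String × Int) :=
  let idx : PySem.Dict String Int := PySem.Dict.ofList [("beg", 0), ("end", 3), ("rate", 8)]
  let lower := header_row.map (fun c =>
    match c with
    | none => ""
    | some s => PySem.Str.lower (PySem.Str.strip s))
  let final := (PySem.List.enumerate lower 0).foldl (fun d p =>
    let d := if tceA_pBeg p.2 then d.insert "beg" p.1 else d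
    let d := if tceA_pEnd p.2 then d.insert "end" p.1 else d
    if tceA_pRate p.2 then d.insert "rate" p.1 else d) idx
  final.items

-- ===== PORT B =====
-- B's per-key predicates (same literal patterns, written in B's source)
def tceB_pBeg (t : String) : Bool :=
  ["disc beg date", "begin date", "start date", "beg date"].any (fun k => PySem.Str.isIn k t)
def tceB_pEnd (t : String) : Bool :=
  ["disc end date", "end date"].any (fun k => PySem.Str.isIn k t)
def tceB_pRate (t : String) : Bool :=
  (["rate chgd", "rate charged", "daily rate"].any (fun k => PySem.Str.isIn k t)) || t == "rate"

-- `hits = [ci for ci,txt in enumerate(lower) if pred(txt)]; hits[-1] if hits else default`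
def tceB_lastIndex (lower : List String) (pred : String → Bool) (default : Int) : Int :=
  let hits := ((PySem.List.enumerate lower 0).filter (fun q => pred q.2)).map (fun q => q.1)
  (PySem.List.pyGet? hits (-1)).getD default

def tce_map_rate_cols_py_alt (header_row : List (Option String)) : List (String × Int) :=
  let lower := header_row.map (fun c =>
    match c with
    | none => ""
    | some s => PySem.Str.lower (PySem.Str.strip s))
  [("beg", tceB_lastIndex lower tceB_pBeg 0),
   ("end", tceB_lastIndex lower tceB_pEnd 3),
   ("rate", tceB_lastIndex lower tceB_pRate 8)]

-- ===== PRECONDITION & SPEC =====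
def Spec_tce_map_rate_cols_py (header_row : List (Option String)) (out : List (String × Int)) : Prop := out = tce_map_rate_cols_py_alt header_row
instance (header_row : List (Option String)) (out : List (String × Int)) : Decidable (Spec_tce_map_rate_cols_py header_row out) := by unfold Spec_tce_map_rate_cols_py; infer_instance

-- ===== CLAIM (what is proved, stated in full; the proofs are below) =====
def Claim_equal_tce_map_rate_cols_py : Prop := ∀ (header_row : List (Option String)), Dom_tce_map_rate_cols_py header_row → Spec_tce_map_rate_cols_py header_row (tce_map_rate_cols_py header_row)

-- ===== LEMMAS AND PROOFS =====

-- last-match accumulator over the pairs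
def tceLastAcc (pred : String → Bool) (d : Int) (pairs : List (Int × String)) : Int :=
  pairs.foldl (fun acc q => if pred q.2 then q.1 else acc) d

lemma tce_insert_beg (b e r v : Int) :
    (PySem.Dict.mk [("beg", b), ("end", e), ("rate", r)]).insert "beg" v
      = PySem.Dict.mk [("beg", v), ("end", e), ("rate", r)] := by
  rfl

lemma tce_insert_end (b e r v : Int) :
    (PySem.Dict.mk [("beg", b), ("end", e), ("rate", r)]).insert "end" v
      = PySem.Dict.mk [("beg", b), ("end", v), ("rate", r)] := by
  rfl

lemma tce_insert_rate (b e r v : Int) :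
    (PySem.Dict.mk [("beg", b), ("end", e), ("rate", r)]).insert "rate" v
      = PySem.Dict.mk [("beg", b), ("end", e), ("rate", v)] := by
  rfl

lemma tce_fold_dict (pairs : List (Int × String)) : ∀ (b e r : Int),
    pairs.foldl (fun d p =>
        let d := if tceA_pBeg p.2 then d.insert "beg" p.1 else d
        let d := if tceA_pEnd p.2 then d.insert "end" p.1 else d
        if tceA_pRate p.2 then d.insert "rate" p.1 else d)
      (PySem.Dict.mk [("beg", b), ("end", e), ("rate", r)])
      = PySem.Dict.mk [("beg", tceLastAcc tceA_pBeg b pairs),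
                       ("end", tceLastAcc tceA_pEnd e pairs),
                       ("rate", tceLastAcc tceA_pRate r pairs)] := by
  induction pairs with
  | nil => intro b e r; rfl
  | cons q rest ih =>
    intro b e r
    simp only [List.foldl_cons, tceLastAcc, List.foldl_cons] at *
    by_cases h1 : tceA_pBeg q.2 <;> by_cases h2 : tceA_pEnd q.2 <;> by_cases h3 : tceA_pRate q.2 <;>
      simp [h1, h2, h3, tce_insert_beg, tce_insert_end, tce_insert_rate, ih]

lemma tce_getLast?_cons {α : Type} (a : α) (xs : List α) :
    (a :: xs).getLast? = some (xs.getLast?.getD a) := by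
  induction xs generalizing a with
  | nil => rfl
  | cons b xs ih => simp [List.getLast?_cons_cons, ih b]

lemma tce_getLast_getD {α : Type} (a : α) (xs : List α) (d : α) :
    ((a :: xs).getLast?.getD d) = xs.getLast?.getD a := by
  rw [tce_getLast?_cons]; rfl

lemma tce_lastAcc_eq_lastIndex (pred : String → Bool) (pairs : List (Int × String)) :
    ∀ (d : Int),
      tceLastAcc pred d pairs
        = (PySem.List.pyGet? ((pairs.filter (fun q => pred q.2)).map (fun q => q.1)) (-1)).getD d := by
  induction pairs with
  | nil => intro d; rfl
  | cons q rest ih =>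
    intro d
    simp only [tceLastAcc, List.foldl_cons] at *
    by_cases h : pred q.2
    · simp [h, ih, PySem.List.pyGet?_neg_one, tce_getLast_getD]
    · simp [h, ih]

-- ===== VERDICT (by name: the statement is the Claim_ definition above) =====
theorem tce_map_rate_cols_py_spec : Claim_equal_tce_map_rate_cols_py := by
  intro header_row _
  show tce_map_rate_cols_py header_row = tce_map_rate_cols_py_alt header_row
  unfold tce_map_rate_cols_py tce_map_rate_cols_py_alt
  simp only [tceB_lastIndex]
  rw [show (PySem.Dict.ofList [("beg", (0:Int)), ("end", 3), ("rate", 8)])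
        = PySem.Dict.mk [("beg", 0), ("end", 3), ("rate", 8)] from rfl]
  rw [tce_fold_dict]
  rw [tce_lastAcc_eq_lastIndex, tce_lastAcc_eq_lastIndex, tce_lastAcc_eq_lastIndex]
  rfl
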